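-- pv_equiv track=rewrite | github.com/ajoshiusc/disc_mri | fetal_mri/evaluation/config.py | has_consecutive_stacks
-- ===== SOURCE A (Python) =====
-- MIN_CONSECUTIVE_STACKS = 4
--
-- def has_consecutive_stacks(stack_keys) -> bool:
--     """True only when sorted stack counts are gap-free with step 1 and
--     have at least MIN_CONSECUTIVE_STACKS entries."""
--     s = sorted(stack_keys)
--     if len(s) < MIN_CONSECUTIVE_STACKS:
--         return False
--     for i in range(1, len(s)):
--         if s[i] - s[i - 1] != 1:
--             return False
--     return True
-- ===== SOURCE B (Python) =====
-- MIN_CONSECUTIVE_STACKS = 4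
--
-- def has_consecutive_stacks(stack_keys) -> bool:
--     n = len(stack_keys)
--     if n < MIN_CONSECUTIVE_STACKS:
--         return False
--     return len(set(stack_keys)) == n and max(stack_keys) - min(stack_keys) == n - 1
-- ===== Notes on version B (the rewrite author's own statement) =====
-- stated objective: alternative
-- what changed: Replaced sort + adjacent-gap scan by a set/min/max check: n values form a gap-free step-1 run iff they are pairwise distinct and max-min == n-1, so no sorting is needed.
import Mathlib
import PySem

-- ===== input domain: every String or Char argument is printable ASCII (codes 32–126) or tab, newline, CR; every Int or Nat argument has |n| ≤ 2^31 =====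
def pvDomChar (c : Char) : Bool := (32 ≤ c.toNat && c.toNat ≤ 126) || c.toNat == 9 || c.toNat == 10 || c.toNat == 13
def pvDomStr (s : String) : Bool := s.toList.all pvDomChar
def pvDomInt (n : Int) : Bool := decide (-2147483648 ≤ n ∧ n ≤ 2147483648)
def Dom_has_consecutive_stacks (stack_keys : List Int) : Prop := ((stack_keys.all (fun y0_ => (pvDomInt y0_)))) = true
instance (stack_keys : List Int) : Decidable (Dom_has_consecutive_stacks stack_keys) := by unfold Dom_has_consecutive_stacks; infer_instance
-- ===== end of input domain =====

-- B replaces A's sort + adjacent-gap scan by a set/min/max check (distinct values and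
-- max - min = n - 1 characterise a gap-free step-1 run); objective: alternative (no sort needed).

-- ===== PORT A =====
def pvMinConsecutiveStacks : Int := 4   -- MIN_CONSECUTIVE_STACKS

-- the 'for i in range(1, len(s))' loop of A (early return false = first failing index)
def pvGoA (s : List Int) : List Int → Bool
  | [] => true
  | i :: rest =>
    if PySem.List.pyGetD s i 0 - PySem.List.pyGetD s (i - 1) 0 ≠ 1 then false
    else pvGoA s rest

def has_consecutive_stacks (stack_keys : List Int) : Bool :=
  let s := PySem.List.sorted stack_keys (fun x => x)
  if (s.length : Int) < pvMinConsecutiveStacks then false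
  else pvGoA s (PySem.List.pyRange 1 (s.length : Int) 1)

-- ===== PORT B =====
def has_consecutive_stacks_alt (stack_keys : List Int) : Bool :=
  let n := stack_keys.length
  if (n : Int) < pvMinConsecutiveStacks then false
  else
    decide ((PySem.Set.ofList stack_keys).length = n)
    && (match PySem.List.max? stack_keys (fun x => x), PySem.List.min? stack_keys (fun x => x) with
        | some mx, some mn => decide (mx - mn = (n : Int) - 1)
        | _, _ => false)   -- unreachable: n ≥ 4 so the list is nonempty (Python max/min would raise only on [])

-- ===== PRECONDITION & SPEC =====
def Spec_has_consecutive_stacks (stack_keys : List Int) (out : Bool) : Prop := out = has_consecutive_stacks_alt stack_keys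
instance (stack_keys : List Int) (out : Bool) : Decidable (Spec_has_consecutive_stacks stack_keys out) := by unfold Spec_has_consecutive_stacks; infer_instance

-- ===== CLAIM (what is proved, stated in full; the proofs are below) =====
def Claim_equal_has_consecutive_stacks : Prop := ∀ (stack_keys : List Int), Dom_has_consecutive_stacks stack_keys → Spec_has_consecutive_stacks stack_keys (has_consecutive_stacks stack_keys)

-- ===== LEMMAS AND PROOFS =====

lemma pvGoA_true_iff (s : List Int) (l : List Int) :
    pvGoA s l = true ↔ ∀ i ∈ l, PySem.List.pyGetD s i 0 - PySem.List.pyGetD s (i - 1) 0 = 1 := by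
  induction l with
  | nil => simp [pvGoA]
  | cons i rest ih =>
    by_cases h : PySem.List.pyGetD s i 0 - PySem.List.pyGetD s (i - 1) 0 = 1
    · simp [pvGoA, h, ih]
    · simp [pvGoA, h]

-- A's loop, restated over Nat indices and total getD
lemma pvChainA_iff (t : List Int) :
    (pvGoA t (PySem.List.pyRange 1 (t.length : Int) 1) = true) ↔
    (∀ k : Nat, k + 1 < t.length → t.getD (k + 1) 0 - t.getD k 0 = 1) := by
  rw [pvGoA_true_iff]
  constructor
  · intro H k hk
    have hi : (((k + 1 : Nat) : Int)) ∈ PySem.List.pyRange 1 (t.length : Int) 1 := by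
      rw [PySem.List.mem_pyRange_one]; push_cast; omega
    have h1 := H _ hi
    rw [show (((k + 1 : Nat) : Int)) - 1 = ((k : Nat) : Int) by push_cast; ring] at h1
    simp only [PySem.List.pyGetD_natCast] at h1
    exact h1
  · intro H i hi
    rw [PySem.List.mem_pyRange_one] at hi
    obtain ⟨h1, h2⟩ := hi
    have hk : i = (((i - 1).toNat + 1 : Nat) : Int) := by push_cast; omega
    rw [hk, show (((i - 1).toNat + 1 : Nat) : Int) - 1 = (((i - 1).toNat : Nat) : Int) by push_cast; ring]
    simp only [PySem.List.pyGetD_natCast]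
    exact H _ (by omega)

-- from unit gaps: every entry is head + index
lemma pvExactRun (t : List Int)
    (hc : ∀ k : Nat, k + 1 < t.length → t.getD (k + 1) 0 - t.getD k 0 = 1) :
    ∀ k : Nat, k < t.length → t.getD k 0 = t.getD 0 0 + (k : Int) := by
  intro k
  induction k with
  | zero => intro _; simp
  | succ m ih =>
    intro h
    have h1 := hc m (by omega)
    have h2 := ih (by omega)
    push_cast
    omega

-- from gaps ≥ 1: entries grow at least linearly
lemma pvStepGe (t : List Int)
    (hs : ∀ k : Nat, k + 1 < t.length → t.getD k 0 + 1 ≤ t.getD (k + 1) 0) :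
    ∀ q : Nat, q < t.length → ∀ p : Nat, p ≤ q → t.getD p 0 + ((q : Int) - (p : Int)) ≤ t.getD q 0 := by
  intro q
  induction q with
  | zero => intro _ p hp; interval_cases p; simp
  | succ m ih =>
    intro hq p hp
    rcases Nat.lt_or_ge p (m + 1) with h | h
    · have h1 := ih (by omega) p (by omega)
      have h2 := hs m (by omega)
      push_cast
      omega
    · have : p = m + 1 := by omega
      subst this
      simp

-- sorted(xs) is monotone in getD form
lemma pvSortedMono (xs : List Int) (p q : Nat) (hpq : p ≤ q)
    (hq : q < (PySem.List.sorted xs (fun x => x)).length) :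
    (PySem.List.sorted xs (fun x => x)).getD p 0 ≤ (PySem.List.sorted xs (fun x => x)).getD q 0 := by
  rw [List.getD_eq_getElem _ _ (by omega), List.getD_eq_getElem _ _ hq]
  exact PySem.List.sorted_id_getElem_mono xs hpq hq

-- min(xs) is the head of sorted(xs)
lemma pvMinEq (xs : List Int) {mn : Int}
    (hmn : PySem.List.min? xs (fun x => x) = some mn) :
    mn = (PySem.List.sorted xs (fun x => x)).getD 0 0 := by
  have hne : xs ≠ [] := by
    intro h; subst h
    rw [(PySem.List.min?_eq_none_iff ([] : List Int) (fun x => x)).mpr rfl] at hmn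
    cases hmn
  cases ht : PySem.List.sorted xs (fun x => x) with
  | nil => exact absurd ((PySem.List.sorted_eq_nil_iff xs (fun x => x) false).mp ht) hne
  | cons m t' =>
    have hle := PySem.List.key_head_sorted_le xs (fun x => x) ht mn (PySem.List.min?_mem hmn)
    have hm_mem : m ∈ xs := by
      have : m ∈ PySem.List.sorted xs (fun x => x) := by rw [ht]; exact List.mem_cons_self
      exact ((PySem.List.sorted_perm xs (fun x => x) false).mem_iff).mp this
    have hge : mn ≤ m := PySem.List.min?_isMin hmn m hm_mem
    have hle' : m ≤ mn := hle
    rw [List.getD_cons_zero]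
    omega

-- max(xs) is the last entry of sorted(xs)
lemma pvMaxEq (xs : List Int) {mx : Int}
    (hmx : PySem.List.max? xs (fun x => x) = some mx) :
    mx = (PySem.List.sorted xs (fun x => x)).getD (xs.length - 1) 0 := by
  have hne : xs ≠ [] := by
    intro h; subst h
    rw [(PySem.List.max?_eq_none_iff ([] : List Int) (fun x => x)).mpr rfl] at hmx
    cases hmx
  have hlen : (PySem.List.sorted xs (fun x => x)).length = xs.length :=
    PySem.List.length_sorted xs (fun x => x) false
  have hpos : 0 < xs.length := List.length_pos_iff.mpr hne
  have hlt : xs.length - 1 < (PySem.List.sorted xs (fun x => x)).length := by omega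
  -- mx ≤ last: mx is a member, the last entry dominates every member
  have hmx_mem : mx ∈ PySem.List.sorted xs (fun x => x) :=
    ((PySem.List.sorted_perm xs (fun x => x) false).mem_iff).mpr (PySem.List.max?_mem hmx)
  obtain ⟨j, hj, hjx⟩ := List.mem_iff_getElem.mp hmx_mem
  have h1 : mx ≤ (PySem.List.sorted xs (fun x => x)).getD (xs.length - 1) 0 := by
    rw [List.getD_eq_getElem _ _ hlt, ← hjx]
    exact PySem.List.sorted_id_getElem_mono xs (by omega) hlt
  -- last ≤ mx: the last entry is a member of xs
  have hlast_mem : (PySem.List.sorted xs (fun x => x)).getD (xs.length - 1) 0 ∈ xs := by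
    rw [List.getD_eq_getElem _ _ hlt]
    exact ((PySem.List.sorted_perm xs (fun x => x) false).mem_iff).mp (List.getElem_mem hlt)
  have h2 : (PySem.List.sorted xs (fun x => x)).getD (xs.length - 1) 0 ≤ mx :=
    PySem.List.max?_isMax hmx _ hlast_mem
  omega

-- len(set(xs)) counts the distinct values of xs
lemma pvSetLen (xs : List Int) : (PySem.Set.ofList xs).length = xs.toFinset.card := by
  have h1 : (PySem.Set.ofList xs).toFinset = xs.toFinset := by
    ext y; simp [PySem.Set.mem_ofList]
  rw [← h1, List.toFinset_card_of_nodup (PySem.Set.nodup_ofList xs)]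

lemma pvSetLen_iff (xs : List Int) : (PySem.Set.ofList xs).length = xs.length ↔ xs.Nodup := by
  rw [pvSetLen, List.card_toFinset]
  constructor
  · intro h
    have := List.Sublist.eq_of_length (List.dedup_sublist xs) h
    rw [← this]
    exact List.nodup_dedup xs
  · intro h
    rw [List.Nodup.dedup h]

-- the heart of the equivalence, over the sorted list t of xs
lemma pvMain (xs : List Int) (h4 : 4 ≤ xs.length) {mx mn : Int}
    (hmx : PySem.List.max? xs (fun x => x) = some mx)
    (hmn : PySem.List.min? xs (fun x => x) = some mn) :
    ((∀ k : Nat, k + 1 < (PySem.List.sorted xs (fun x => x)).length →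
        (PySem.List.sorted xs (fun x => x)).getD (k + 1) 0 - (PySem.List.sorted xs (fun x => x)).getD k 0 = 1)
      ↔ (xs.Nodup ∧ mx - mn = (xs.length : Int) - 1)) := by
  set t := PySem.List.sorted xs (fun x => x) with ht
  have hlen : t.length = xs.length := PySem.List.length_sorted xs (fun x => x) false
  have hmn' : mn = t.getD 0 0 := pvMinEq xs hmn
  have hmx' : mx = t.getD (xs.length - 1) 0 := pvMaxEq xs hmx
  constructor
  · intro hc
    have E := pvExactRun t hc
    have hp : t.Pairwise (· < ·) := by
      rw [List.pairwise_iff_getElem]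
      intro i j hi hj hij
      have Ei := E i (by omega)
      have Ej := E j (by omega)
      rw [List.getD_eq_getElem _ _ hi] at Ei
      rw [List.getD_eq_getElem _ _ hj] at Ej
      omega
    have hnd : xs.Nodup :=
      ((PySem.List.sorted_perm xs (fun x => x) false).nodup_iff).mp (hp.imp (fun h => ne_of_lt h))
    refine ⟨hnd, ?_⟩
    have := E (xs.length - 1) (by omega)
    rw [hmn', hmx', this]
    omega
  · rintro ⟨hnd, hdiff⟩
    have hndt : t.Nodup := ((PySem.List.sorted_perm xs (fun x => x) false).nodup_iff).mpr hnd
    have hadj : ∀ k : Nat, k + 1 < t.length → t.getD k 0 + 1 ≤ t.getD (k + 1) 0 := by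
      intro k hk
      have hle := pvSortedMono xs k (k + 1) (by omega) (by rw [← ht] at *; omega)
      have hne : t.getD k 0 ≠ t.getD (k + 1) 0 := by
        rw [List.getD_eq_getElem _ _ (by omega), List.getD_eq_getElem _ _ hk]
        intro h
        have := (List.Nodup.getElem_inj_iff hndt).mp h
        omega
      rw [← ht] at hle
      omega
    have G := pvStepGe t hadj
    intro k hk
    have h1 := hadj k hk
    have h2 := G (xs.length - 1) (by omega) (k + 1) (by omega)
    have h3 := G k (by omega) 0 (by omega)
    rw [hmn', hmx'] at hdiff
    push_cast at h2 h3
    omega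

-- ===== VERDICT (by name: the statement is the Claim_ definition above) =====
theorem has_consecutive_stacks_spec : Claim_equal_has_consecutive_stacks := by
  unfold Claim_equal_has_consecutive_stacks
  intro xs _
  unfold Spec_has_consecutive_stacks has_consecutive_stacks has_consecutive_stacks_alt
  simp only [PySem.List.length_sorted]
  by_cases h4 : ((xs.length : Int) < pvMinConsecutiveStacks)
  · simp [h4]
  · have h4' : 4 ≤ xs.length := by unfold pvMinConsecutiveStacks at h4; omega
    have hne : xs ≠ [] := by intro h; subst h; simp at h4'
    simp only [h4, if_false]
    obtain ⟨mx, hmx⟩ : ∃ mx, PySem.List.max? xs (fun x => x) = some mx := by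
      cases h : PySem.List.max? xs (fun x => x) with
      | none => exact absurd ((PySem.List.max?_eq_none_iff xs (fun x => x)).mp h) hne
      | some v => exact ⟨v, rfl⟩
    obtain ⟨mn, hmn⟩ : ∃ mn, PySem.List.min? xs (fun x => x) = some mn := by
      cases h : PySem.List.min? xs (fun x => x) with
      | none => exact absurd ((PySem.List.min?_eq_none_iff xs (fun x => x)).mp h) hne
      | some v => exact ⟨v, rfl⟩
    rw [hmx, hmn]
    rw [Bool.eq_iff_iff]
    rw [show ((xs.length : Int)) = (((PySem.List.sorted xs (fun x => x)).length : Int)) by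
      rw [PySem.List.length_sorted]]
    simp only [Bool.and_eq_true, decide_eq_true_eq]
    rw [pvChainA_iff, pvMain xs h4' hmx hmn, pvSetLen_iff]
    simp [PySem.List.length_sorted]
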